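-- pv_equiv track=rewrite | github.com/jjbankert/advent_of_code | aoc_2020/10_adapter_array.py | get_subsections
-- ===== SOURCE A (Python) =====
-- def get_subsections(chain: list[int]) -> list[list[int]]:
--     chain_of_chains = []
--     new_chain = []
--     for idx in range(len(chain) - 1):
--         new_chain.append(chain[idx])
--
--         if chain[idx + 1] == chain[idx] + 3:
--             chain_of_chains.append(new_chain)
--             new_chain = []
--
--     return chain_of_chains
-- ===== SOURCE B (Python) =====
-- def get_subsections(chain: list[int]) -> list[list[int]]:
--     gaps = [i for i in range(len(chain) - 1) if chain[i + 1] == chain[i] + 3]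
--     out = []
--     start = 0
--     for g in gaps:
--         out.append(chain[start:g + 1])
--         start = g + 1
--     return out
-- ===== Notes on version B (the rewrite author's own statement) =====
-- stated objective: alternative
-- what changed: Instead of growing a running sub-chain element by element, B first collects the gap positions and then emits one slice chain[start:g+1] per gap, so no per-element accumulator exists.
import Mathlib
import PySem

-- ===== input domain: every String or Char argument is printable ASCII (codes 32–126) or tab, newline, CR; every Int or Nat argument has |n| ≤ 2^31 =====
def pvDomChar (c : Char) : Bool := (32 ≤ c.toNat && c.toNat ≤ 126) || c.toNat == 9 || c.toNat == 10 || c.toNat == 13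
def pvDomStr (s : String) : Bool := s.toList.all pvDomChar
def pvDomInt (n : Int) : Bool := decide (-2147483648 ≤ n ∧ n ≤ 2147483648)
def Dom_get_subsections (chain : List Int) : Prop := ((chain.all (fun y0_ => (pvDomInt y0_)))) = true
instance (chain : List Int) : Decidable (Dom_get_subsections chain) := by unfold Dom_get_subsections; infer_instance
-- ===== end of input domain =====

-- B collects the gap positions first and slices the chain at them, instead of growing a running sub-chain; alternative decomposition, same cost.


-- ===== PORT A =====
-- one step of A's loop body: append chain[idx] to the running sub-chain, cut at a +3 gap
def gsStepA (chain : List Int) (st : List (List Int) × List Int) (idx : Int) :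
    List (List Int) × List Int :=
  let new_chain := st.2 ++ [PySem.List.pyGetD chain idx 0]
  if PySem.List.pyGetD chain (idx + 1) 0 = PySem.List.pyGetD chain idx 0 + 3 then
    (st.1 ++ [new_chain], [])
  else
    (st.1, new_chain)

def get_subsections (chain : List Int) : List (List Int) :=
  ((PySem.List.pyRange 0 ((chain.length : Int) - 1) 1).foldl (gsStepA chain) ([], [])).1

-- ===== PORT B =====
-- one step of B's loop: emit the slice chain[start:g+1], move the cursor past the gap
def gsStepB (chain : List Int) (st : List (List Int) × Int) (g : Int) :
    List (List Int) × Int :=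
  (st.1 ++ [PySem.List.slice chain (some st.2) (some (g + 1))], g + 1)

def get_subsections_alt (chain : List Int) : List (List Int) :=
  let gaps := (PySem.List.pyRange 0 ((chain.length : Int) - 1) 1).filter
    (fun i => PySem.List.pyGetD chain (i + 1) 0 == PySem.List.pyGetD chain i 0 + 3)
  ((gaps.foldl (gsStepB chain) ([], 0))).1

-- ===== PRECONDITION & SPEC =====
def Spec_get_subsections (chain : List Int) (out : List (List Int)) : Prop := out = get_subsections_alt chain
instance (chain : List Int) (out : List (List Int)) : Decidable (Spec_get_subsections chain out) := by unfold Spec_get_subsections; infer_instance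

-- ===== CLAIM (what is proved, stated in full; the proofs are below) =====
def Claim_equal_get_subsections : Prop := ∀ (chain : List Int), Dom_get_subsections chain → Spec_get_subsections chain (get_subsections chain)

-- ===== LEMMAS AND PROOFS =====

-- appending chain[a] to the slice chain[s:a] extends it to chain[s:a+1]
lemma slice_snoc (chain : List Int) (s a : Int) (hs : 0 ≤ s) (hsa : s ≤ a)
    (ha : a < (chain.length : Int)) :
    PySem.List.slice chain (some s) (some a) ++ [PySem.List.pyGetD chain a 0]
      = PySem.List.slice chain (some s) (some (a + 1)) := by
  have h1 : a.toNat < chain.length := by omega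
  have h2 : s.toNat ≤ a.toNat := by omega
  rw [PySem.List.slice_toNat _ hs (by omega), PySem.List.slice_toNat _ hs (by omega),
      PySem.List.pyGetD_eq_getElem _ _ (hs.trans hsa) ha]
  have h3 : (a + 1).toNat - s.toNat = (a.toNat - s.toNat) + 1 := by omega
  rw [h3, List.take_add_one]
  congr 1
  have hget : (List.drop s.toNat chain)[a.toNat - s.toNat]? = some (chain[a.toNat]) := by
    have he : s.toNat + (a.toNat - s.toNat) = a.toNat := by omega
    rw [List.getElem?_drop, he, List.getElem?_eq_getElem h1]
  rw [hget]
  rfl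

-- loop invariant: starting A's fold with running sub-chain chain[s:a] and B's fold
-- (over the gaps in the same range) with cursor s yields the same collected list
lemma main_inv (chain : List Int) (n : Nat) :
    ∀ (a : Int) (acc : List (List Int)) (s : Int),
      ((chain.length : Int) - 1 - a).toNat = n → 0 ≤ s → s ≤ a →
      ((PySem.List.pyRange a ((chain.length : Int) - 1) 1).foldl (gsStepA chain)
        (acc, PySem.List.slice chain (some s) (some a))).1
      = (((PySem.List.pyRange a ((chain.length : Int) - 1) 1).filter
          (fun i => PySem.List.pyGetD chain (i + 1) 0 == PySem.List.pyGetD chain i 0 + 3)).foldl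
          (gsStepB chain) (acc, s)).1 := by
  induction n with
  | zero =>
    intro a acc s hn hs hsa
    rw [PySem.List.pyRange_one_eq_nil (by omega)]
    simp
  | succ m ih =>
    intro a acc s hn hs hsa
    have hab : a < (chain.length : Int) - 1 := by omega
    rw [PySem.List.pyRange_one_cons hab]
    have hsnoc := slice_snoc chain s a hs hsa (by omega)
    by_cases hg : PySem.List.pyGetD chain (a + 1) 0 = PySem.List.pyGetD chain a 0 + 3
    · simp only [List.filter_cons, hg, List.foldl_cons]
      simp only [gsStepA, if_pos hg, hsnoc, beq_self_eq_true, if_true]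
      have he : ([] : List Int) = PySem.List.slice chain (some (a + 1)) (some (a + 1)) := by
        rw [PySem.List.slice_toNat _ (by omega) (by omega)]; simp
      rw [he]
      exact ih (a + 1) (acc ++ [PySem.List.slice chain (some s) (some (a + 1))]) (a + 1)
        (by omega) (by omega) le_rfl
    · simp only [List.filter_cons, List.foldl_cons]
      have hg' : (PySem.List.pyGetD chain (a + 1) 0 == PySem.List.pyGetD chain a 0 + 3) = false := by
        simp [hg]
      simp only [hg', gsStepA, if_neg hg, hsnoc]
      exact ih (a + 1) acc s (by omega) hs (by omega)

-- ===== VERDICT (by name: the statement is the Claim_ definition above) =====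
theorem get_subsections_spec : Claim_equal_get_subsections := by
  intro chain _
  unfold Spec_get_subsections get_subsections get_subsections_alt
  have h0 : ([] : List Int) = PySem.List.slice chain (some 0) (some 0) := by
    rw [PySem.List.slice_toNat _ le_rfl le_rfl]; simp
  rw [h0]
  exact main_inv chain ((chain.length : Int) - 1 - 0).toNat 0 [] 0 rfl le_rfl le_rfl
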